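-- pv_equiv track=rewrite | github.com/ahmadfaizalbh/Chatbot | chatbot/grammar_corrector.py | fix_contractions
-- ===== SOURCE A (Python) =====
-- def fix_contractions(text):
--     """Fix broken contractions like "musk s" -> "musk's" """
--     words = text.split()
--     fixed = []
--
--     i = 0
--     while i < len(words):
--         word = words[i]
--
--         # Check if next word is a contraction part
--         if i + 1 < len(words):
--             next_word = words[i + 1]
--             if next_word in ['s', 't', 're', 've', 'll', 'd', 'm']:
--                 # Merge with apostrophe
--                 fixed.append(word + "'" + next_word)
--                 i += 2
--                 continue
--
--         fixed.append(word)
--         i += 1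
--
--     return ' '.join(fixed)
-- ===== SOURCE B (Python) =====
-- def fix_contractions(text):
--     """Fix broken contractions like "musk s" -> "musk's" """
--     FRAGMENTS = {'s', 't', 're', 've', 'll', 'd', 'm'}
--     fixed = []
--     pending = None  # previous word, not yet emitted
--     for word in text.split():
--         if pending is None:
--             pending = word
--         elif word in FRAGMENTS:
--             fixed.append(pending + "'" + word)
--             pending = None
--         else:
--             fixed.append(pending)
--             pending = word
--     if pending is not None:
--         fixed.append(pending)
--     return ' '.join(fixed)
-- ===== Notes on version B (the rewrite author's own statement) =====
-- stated objective: idiomatic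
-- what changed: Replaces the index-based while loop with look-ahead (words[i+1], i += 2, continue) by a single for-loop over the words with a look-behind pending-word accumulator and a set for fragment membership; no indices are maintained.
import Mathlib
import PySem

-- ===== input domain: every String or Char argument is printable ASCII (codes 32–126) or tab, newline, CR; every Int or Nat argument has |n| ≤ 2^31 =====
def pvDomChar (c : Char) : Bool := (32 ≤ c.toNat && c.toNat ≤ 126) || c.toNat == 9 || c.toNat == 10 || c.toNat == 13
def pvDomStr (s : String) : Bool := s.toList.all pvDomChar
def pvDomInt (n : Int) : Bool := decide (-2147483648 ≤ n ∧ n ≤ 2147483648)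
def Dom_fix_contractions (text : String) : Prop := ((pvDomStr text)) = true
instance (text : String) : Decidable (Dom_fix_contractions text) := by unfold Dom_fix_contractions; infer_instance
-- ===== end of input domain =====

-- B replaces A's index-walk with look-ahead (words[i+1], i += 2) by a single look-behind
-- fold carrying a pending previous word; same return value, different decomposition (idiomatic).


-- ===== PORT A =====
-- A's while loop over index i: 'i+1 < len' look-ahead, merge and 'i += 2; continue',
-- else emit words[i] and 'i += 1' — transcribed as the corresponding structural recursion.
def fixContractionsGoA : List String → List String
  | [] => []
  | word :: rest =>
    match rest with
    | next_word :: rest' =>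
      if (["s", "t", "re", "ve", "ll", "d", "m"]).contains next_word then
        (word ++ "'" ++ next_word) :: fixContractionsGoA rest'
      else
        word :: fixContractionsGoA (next_word :: rest')
    | [] => [word]

def fix_contractions (text : String) : String :=
  PySem.Str.join " " (fixContractionsGoA (PySem.Str.split₀ text))

-- ===== PORT B =====
-- B's FRAGMENTS set literal
def pvFragments : PySem.Set String := PySem.Set.ofList ["s", "t", "re", "ve", "ll", "d", "m"]

-- B's loop body: state = (fixed, pending word)
def fixContractionsStep : (List String × Option String) → String → (List String × Option String)
  | (fixed, none), word => (fixed, some word)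
  | (fixed, some p), word =>
    if pvFragments.contains word then (fixed ++ [p ++ "'" ++ word], none)
    else (fixed ++ [p], some word)

def fix_contractions_alt (text : String) : String :=
  let st := (PySem.Str.split₀ text).foldl fixContractionsStep ([], none)
  PySem.Str.join " "
    (match st.2 with
     | some p => st.1 ++ [p]
     | none => st.1)

-- ===== PRECONDITION & SPEC =====
def Spec_fix_contractions (text : String) (out : String) : Prop := out = fix_contractions_alt text
instance (text : String) (out : String) : Decidable (Spec_fix_contractions text out) := by unfold Spec_fix_contractions; infer_instance

-- ===== CLAIM (what is proved, stated in full; the proofs are below) =====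
def Claim_equal_fix_contractions : Prop := ∀ (text : String), Dom_fix_contractions text → Spec_fix_contractions text (fix_contractions text)

-- ===== LEMMAS AND PROOFS =====

-- B's set literal has no duplicates, so membership in it is membership in A's list literal.
theorem pvFragments_contains (w : String) :
    pvFragments.contains w = (["s", "t", "re", "ve", "ll", "d", "m"]).contains w := rfl

-- B's fold, started with an empty pending slot, emits exactly A's token list after 'acc'.
theorem fixContractions_fold_eq (ws : List String) :
    ∀ acc : List String,
      (ws.foldl fixContractionsStep (acc, none)).1 ++
        (ws.foldl fixContractionsStep (acc, none)).2.toList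
      = acc ++ fixContractionsGoA ws := by
  induction ws using fixContractionsGoA.induct with
  | case1 => intro acc; simp [fixContractionsGoA]
  | case2 word next_word rest' hfrag ih =>
      intro acc
      simp only [List.foldl_cons, fixContractionsStep, pvFragments_contains, hfrag, if_pos]
      rw [ih]
      conv_rhs => rw [fixContractionsGoA]
      rw [if_pos hfrag]
      simp
  | case3 word next_word rest' hfrag ih =>
      intro acc
      have hkey : rest'.foldl fixContractionsStep (acc ++ [word], some next_word)
          = (next_word :: rest').foldl fixContractionsStep (acc ++ [word], none) := by
        simp [List.foldl_cons, fixContractionsStep]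
      simp only [List.foldl_cons, fixContractionsStep, pvFragments_contains,
        if_neg hfrag]
      rw [hkey, ih]
      conv_rhs => rw [fixContractionsGoA]
      rw [if_neg hfrag]
      simp
  | case4 word => intro acc; simp [fixContractionsGoA, List.foldl_cons, fixContractionsStep]

-- ===== VERDICT (by name: the statement is the Claim_ definition above) =====
theorem fix_contractions_spec : Claim_equal_fix_contractions := by
  intro text _
  unfold Spec_fix_contractions fix_contractions fix_contractions_alt
  have h := fixContractions_fold_eq (PySem.Str.split₀ text) []
  simp only [List.nil_append] at h
  congr 1
  cases hst : ((PySem.Str.split₀ text).foldl fixContractionsStep ([], none)).2 with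
  | none => rw [← h, hst]; simp
  | some p => rw [← h, hst]; simp
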